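-- pv_equiv track=rewrite | github.com/LiorKirshner/Sort-Search-Algorithms | quick_sort.py | partition_2list
-- ===== SOURCE A (Python) =====
-- def partition_2list(A,k):
--     left = 0
--     right = len(A)-1
--     B = [0]*len(A)
--     for i in range(len(A)):
--         if A[i] > k:
--             B[right] = A[i]
--             right = right-1
--         else:
--             B[left] = A[i]
--             left = left+1
--     return B
-- ===== SOURCE B (Python) =====
-- def partition_2list(A, k):
--     front = [x for x in A if x <= k]
--     back = [x for x in A if x > k]
--     return front + back[::-1]
-- ===== Notes on version B (the rewrite author's own statement) =====
-- stated objective: simpler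
-- what changed: Replaces the two-pointer in-place fill of a preallocated zero array with two order-preserving filter passes (<=k and >k) concatenated with the >k group reversed.
import Mathlib
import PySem

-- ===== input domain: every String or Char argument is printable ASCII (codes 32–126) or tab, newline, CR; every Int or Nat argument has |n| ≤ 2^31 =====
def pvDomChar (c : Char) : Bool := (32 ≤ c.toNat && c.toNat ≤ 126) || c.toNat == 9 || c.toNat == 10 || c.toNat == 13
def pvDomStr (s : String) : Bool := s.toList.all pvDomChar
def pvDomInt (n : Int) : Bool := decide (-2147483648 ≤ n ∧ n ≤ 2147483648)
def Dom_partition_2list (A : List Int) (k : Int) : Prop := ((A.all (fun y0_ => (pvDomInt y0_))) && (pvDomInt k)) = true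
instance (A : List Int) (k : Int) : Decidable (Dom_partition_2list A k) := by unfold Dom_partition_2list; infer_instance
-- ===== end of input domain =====

-- B replaces A's two-pointer fill of a preallocated array with two filter passes
-- and a concatenation (objective: simpler). Return-value equivalence; neither mutates A.

-- ===== PORT A =====
-- two-pointer fill loop: state (left, right, B); B[idx] = v is pySetD (always in range here)
def partition_2list_loop (xs : List Int) (k : Int) (left right : Int) (B : List Int) : List Int :=
  match xs with
  | [] => B
  | x :: rest =>
    if x > k then
      partition_2list_loop rest k left (right - 1) (PySem.List.pySetD B right x)
    else
      partition_2list_loop rest k (left + 1) right (PySem.List.pySetD B left x)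

def partition_2list (A : List Int) (k : Int) : List Int :=
  partition_2list_loop A k 0 ((A.length : Int) - 1) (List.replicate A.length 0)

-- ===== PORT B =====
def partition_2list_alt (A : List Int) (k : Int) : List Int :=
  (A.filter (fun x => decide (x ≤ k))) ++ (A.filter (fun x => decide (x > k))).reverse

-- ===== PRECONDITION & SPEC =====
def Spec_partition_2list (A : List Int) (k : Int) (out : List Int) : Prop := out = partition_2list_alt A k
instance (A : List Int) (k : Int) (out : List Int) : Decidable (Spec_partition_2list A k out) := by unfold Spec_partition_2list; infer_instance

-- ===== CLAIM (what is proved, stated in full; the proofs are below) =====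
def Claim_equal_partition_2list : Prop := ∀ (A : List Int) (k : Int), Dom_partition_2list A k → Spec_partition_2list A k (partition_2list A k)

-- ===== LEMMAS AND PROOFS =====

lemma set_append_left_len (pre ys : List Int) (x : Int) :
    (pre ++ ys).set pre.length x = pre ++ ys.set 0 x := by
  induction pre with
  | nil => simp
  | cons a t ih => simp [ih]

lemma set_replicate_last (m : Nat) (x : Int) (suf : List Int) :
    (List.replicate (m + 1) 0 ++ suf).set m x = List.replicate m 0 ++ x :: suf := by
  induction m with
  | zero => simp
  | succ n ih => simpa [List.replicate_succ] using ih

lemma set_mid (pre : List Int) (m : Nat) (x : Int) (suf : List Int) :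
    (pre ++ List.replicate (m + 1) 0 ++ suf).set (pre.length + m) x
      = pre ++ List.replicate m 0 ++ x :: suf := by
  induction pre with
  | nil => simpa using set_replicate_last m x suf
  | cons a t ih =>
    have : (a :: t).length + m = (t.length + m) + 1 := by simp; omega
    rw [this]
    simpa [List.set] using ih

lemma loop_invariant (xs : List Int) (k : Int) (pre suf : List Int) :
    partition_2list_loop xs k (pre.length : Int) ((pre.length : Int) + (xs.length : Int) - 1)
      (pre ++ List.replicate xs.length 0 ++ suf)
    = pre ++ xs.filter (fun x => decide (x ≤ k)) ++ (xs.filter (fun x => decide (x > k))).reverse ++ suf := by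
  induction xs generalizing pre suf with
  | nil => simp [partition_2list_loop]
  | cons x rest ih =>
    by_cases hx : x > k
    · have hnle : ¬ x ≤ k := not_le.mpr hx
      have hidx : (pre.length : Int) + ((x :: rest).length : Int) - 1
          = ((pre.length + rest.length : Nat) : Int) := by push_cast [List.length_cons]; ring
      have hset : PySem.List.pySetD (pre ++ List.replicate (x :: rest).length 0 ++ suf)
            ((pre.length : Int) + ((x :: rest).length : Int) - 1) x
          = pre ++ List.replicate rest.length 0 ++ (x :: suf) := by
        rw [hidx, PySem.List.pySetD_natCast]
        simpa [List.length_cons] using set_mid pre rest.length x suf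
      have hr : (pre.length : Int) + ((x :: rest).length : Int) - 1 - 1
          = (pre.length : Int) + (rest.length : Int) - 1 := by push_cast [List.length_cons]; ring
      rw [show partition_2list_loop (x :: rest) k (pre.length : Int)
            ((pre.length : Int) + ((x :: rest).length : Int) - 1)
            (pre ++ List.replicate (x :: rest).length 0 ++ suf)
          = partition_2list_loop rest k (pre.length : Int)
            ((pre.length : Int) + ((x :: rest).length : Int) - 1 - 1)
            (PySem.List.pySetD (pre ++ List.replicate (x :: rest).length 0 ++ suf)
              ((pre.length : Int) + ((x :: rest).length : Int) - 1) x) by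
          simp [partition_2list_loop, hx]]
      rw [hset, hr, ih pre (x :: suf)]
      simp [List.filter, hnle, hx]
    · have hle : x ≤ k := not_lt.mp hx
      have hset : PySem.List.pySetD (pre ++ List.replicate (x :: rest).length 0 ++ suf)
            (pre.length : Int) x
          = (pre ++ [x]) ++ List.replicate rest.length 0 ++ suf := by
        rw [PySem.List.pySetD_natCast, List.append_assoc, set_append_left_len]
        simp [List.replicate_succ]
      have hl : (pre.length : Int) + 1 = (((pre ++ [x]).length : Nat) : Int) := by
        simp
      have hr : (pre.length : Int) + ((x :: rest).length : Int) - 1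
          = (((pre ++ [x]).length : Nat) : Int) + (rest.length : Int) - 1 := by
        simp; ring
      rw [show partition_2list_loop (x :: rest) k (pre.length : Int)
            ((pre.length : Int) + ((x :: rest).length : Int) - 1)
            (pre ++ List.replicate (x :: rest).length 0 ++ suf)
          = partition_2list_loop rest k ((pre.length : Int) + 1)
            ((pre.length : Int) + ((x :: rest).length : Int) - 1)
            (PySem.List.pySetD (pre ++ List.replicate (x :: rest).length 0 ++ suf)
              (pre.length : Int) x) by
          simp [partition_2list_loop, hx]]
      rw [hset, hl, hr, ih (pre ++ [x]) suf]
      simp [List.filter, hle, hx]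

-- ===== VERDICT (by name: the statement is the Claim_ definition above) =====
theorem partition_2list_spec : Claim_equal_partition_2list := by
  intro A k _
  unfold Spec_partition_2list partition_2list partition_2list_alt
  have h := loop_invariant A k [] []
  simpa using h
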